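-- pv_equiv track=rewrite | github.com/KawanMark/Competitive-Programming---UFMG-List | Basics/BadPrices.py | lilkaw
-- ===== SOURCE A (Python) =====
-- def lilkaw(n, precos):
--     precos_ruins = 0
--
--     menor_preco = float('inf')
--
--     for i in range(n - 1, -1, -1):
--         if precos[i] < menor_preco:
--             menor_preco = precos[i]
--         else:
--             precos_ruins += 1
--
--     return precos_ruins
-- ===== SOURCE B (Python) =====
-- def lilkaw(n, precos):
--     if n <= 0:
--         return 0
--     suf = [None]  # suffix minima of precos[:n], built back to front; None = empty suffix
--     for i in range(n - 1, -1, -1):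
--         s = suf[-1]
--         p = precos[i]
--         suf.append(s if s is not None and s <= p else p)
--     suf.reverse()
--     return sum(1 for p, s in zip(precos[:n], suf[1:]) if s is not None and p >= s)
-- ===== Notes on version B (the rewrite author's own statement) =====
-- stated objective: alternative
-- what changed: Replaces A's single streaming backward pass (running minimum plus counter in one loop) with an explicit suffix-minimum table built first, then a separate forward counting pass over zip(prefix, table).
import Mathlib
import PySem

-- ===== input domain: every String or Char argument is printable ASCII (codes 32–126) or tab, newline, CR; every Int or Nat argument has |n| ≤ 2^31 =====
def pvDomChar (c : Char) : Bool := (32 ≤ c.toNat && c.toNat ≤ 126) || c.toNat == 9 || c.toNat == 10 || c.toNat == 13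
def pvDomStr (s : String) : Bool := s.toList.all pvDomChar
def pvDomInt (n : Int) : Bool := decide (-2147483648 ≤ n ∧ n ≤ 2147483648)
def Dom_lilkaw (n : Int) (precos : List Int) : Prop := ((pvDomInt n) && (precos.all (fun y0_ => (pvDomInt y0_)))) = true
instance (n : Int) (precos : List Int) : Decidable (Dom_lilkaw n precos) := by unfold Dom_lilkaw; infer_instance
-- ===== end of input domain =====

-- B builds an explicit suffix-minimum table and then counts in a separate forward pass;
-- same O(n) cost, alternative decomposition (equivalence is about the return value only).

-- ===== PORT A =====
def lilkaw (n : Int) (precos : List Int) : Int :=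
  ((PySem.List.pyRange (n - 1) (-1) (-1)).foldl
    (fun (st : Int × Option Int) i =>
      match st.2 with
      | none => (st.1, some (PySem.List.pyGetD precos i 0))
      | some m =>
        if PySem.List.pyGetD precos i 0 < m then (st.1, some (PySem.List.pyGetD precos i 0))
        else (st.1 + 1, some m))
    (0, none)).1

-- ===== PORT B =====
def lilkaw_alt (n : Int) (precos : List Int) : Int :=
  if n ≤ 0 then 0
  else
    let suf := ((PySem.List.pyRange (n - 1) (-1) (-1)).foldl
      (fun (suf : List (Option Int)) i =>
        suf ++ [match PySem.List.pyGetD suf (-1) none with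
                | some m =>
                  if m ≤ PySem.List.pyGetD precos i 0 then some m
                  else some (PySem.List.pyGetD precos i 0)
                | none => some (PySem.List.pyGetD precos i 0)])
      [none]).reverse
    ((PySem.List.slice precos none (some n)).zip (PySem.List.slice suf (some 1) none)).foldl
      (fun c ps =>
        match ps.2 with
        | some s => if s ≤ ps.1 then c + 1 else c
        | none => c)
      0

-- ===== PRECONDITION & SPEC =====
-- A raises IndexError iff some visited index n-1,…,0 is out of range, i.e. iff n > len(precos).
def Pre_lilkaw (n : Int) (precos : List Int) : Prop := n ≤ (precos.length : Int)
instance (n : Int) (precos : List Int) : Decidable (Pre_lilkaw n precos) := by unfold Pre_lilkaw; infer_instance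
def pvWitness_lilkaw : Int × List Int := (3, [5, 2, 4])

def Spec_lilkaw (n : Int) (precos : List Int) (out : Int) : Prop := out = lilkaw_alt n precos
instance (n : Int) (precos : List Int) (out : Int) : Decidable (Spec_lilkaw n precos out) := by unfold Spec_lilkaw; infer_instance

-- ===== CLAIM (what is proved, stated in full; the proofs are below) =====
def Claim_equal_lilkaw : Prop := ∀ (n : Int) (precos : List Int), Dom_lilkaw n precos → Pre_lilkaw n precos → Spec_lilkaw n precos (lilkaw n precos)

-- ===== LEMMAS AND PROOFS =====

-- suffix-minimum table of a list: sufList l = [min l[0:], min l[1:], …, none]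
def sufList : List Int → List (Option Int)
  | [] => [none]
  | x :: xs =>
    (match (sufList xs).headD none with
     | some m => if m ≤ x then some m else some x
     | none => some x) :: sufList xs

-- reference count: number of positions whose strict-suffix minimum is ≤ the element
def cnt : List Int → Int
  | [] => 0
  | x :: xs =>
    (match (sufList xs).headD none with
     | some s => if s ≤ x then 1 else 0
     | none => 0) + cnt xs

-- A's index fold over range(n-1,-1,-1) = value fold over the reversed prefix
lemma idxfoldA (l : List Int) : ∀ (m : Nat), m ≤ l.length → ∀ (st : Int × Option Int),
    (PySem.List.pyRange ((m : Int) - 1) (-1) (-1)).foldl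
      (fun (st : Int × Option Int) i =>
        match st.2 with
        | none => (st.1, some (PySem.List.pyGetD l i 0))
        | some mn =>
          if PySem.List.pyGetD l i 0 < mn then (st.1, some (PySem.List.pyGetD l i 0))
          else (st.1 + 1, some mn))
      st
    = ((l.take m).reverse).foldl
      (fun (st : Int × Option Int) p =>
        match st.2 with
        | none => (st.1, some p)
        | some mn => if p < mn then (st.1, some p) else (st.1 + 1, some mn))
      st := by
  intro m
  induction m with
  | zero =>
    intro _ st
    rw [PySem.List.pyRange_neg_one_eq_nil (by norm_num)]
    simp
  | succ k ih =>
    intro hm st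
    have hk : k < l.length := by omega
    have h1 : ((k + 1 : Nat) : Int) - 1 = (k : Int) := by push_cast; ring
    rw [h1, PySem.List.pyRange_neg_one_cons (by omega), List.foldl_cons]
    rw [List.take_add_one, List.getElem?_eq_getElem hk]
    simp only [Option.toList_some, List.reverse_append, List.reverse_cons, List.reverse_nil,
      List.nil_append, List.singleton_append, List.foldl_cons]
    rw [ih (by omega)]
    simp [PySem.List.pyGetD_natCast, List.getD_eq_getElem?_getD, List.getElem?_eq_getElem hk]

-- B's index fold (suffix-table build) = value fold over the reversed prefix
lemma idxfoldB (l : List Int) : ∀ (m : Nat), m ≤ l.length → ∀ (st : List (Option Int)),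
    (PySem.List.pyRange ((m : Int) - 1) (-1) (-1)).foldl
      (fun (suf : List (Option Int)) i =>
        suf ++ [match PySem.List.pyGetD suf (-1) none with
                | some mn =>
                  if mn ≤ PySem.List.pyGetD l i 0 then some mn
                  else some (PySem.List.pyGetD l i 0)
                | none => some (PySem.List.pyGetD l i 0)])
      st
    = ((l.take m).reverse).foldl
      (fun (suf : List (Option Int)) p =>
        suf ++ [match PySem.List.pyGetD suf (-1) none with
                | some mn => if mn ≤ p then some mn else some p
                | none => some p])
      st := by
  intro m
  induction m with
  | zero =>
    intro _ st
    rw [PySem.List.pyRange_neg_one_eq_nil (by norm_num)]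
    simp
  | succ k ih =>
    intro hm st
    have hk : k < l.length := by omega
    have h1 : ((k + 1 : Nat) : Int) - 1 = (k : Int) := by push_cast; ring
    rw [h1, PySem.List.pyRange_neg_one_cons (by omega), List.foldl_cons]
    rw [List.take_add_one, List.getElem?_eq_getElem hk]
    simp only [Option.toList_some, List.reverse_append, List.reverse_cons, List.reverse_nil,
      List.nil_append, List.singleton_append, List.foldl_cons]
    rw [ih (by omega)]
    simp [PySem.List.pyGetD_natCast, List.getD_eq_getElem?_getD, List.getElem?_eq_getElem hk]

-- A's value fold computes the reference count and the overall minimum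
lemma Aval (l : List Int) :
    l.reverse.foldl
      (fun (st : Int × Option Int) p =>
        match st.2 with
        | none => (st.1, some p)
        | some mn => if p < mn then (st.1, some p) else (st.1 + 1, some mn))
      (0, none)
    = (cnt l, (sufList l).headD none) := by
  induction l with
  | nil => simp [cnt, sufList]
  | cons x xs ih =>
    rw [List.reverse_cons, List.foldl_append, ih, List.foldl_cons, List.foldl_nil]
    obtain ⟨s0, t0, hs⟩ : ∃ s t, sufList xs = s :: t := by
      cases xs <;> exact ⟨_, _, rfl⟩
    simp only [cnt, sufList, hs, List.headD_cons]
    cases s0 with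
    | none => simp
    | some m =>
      by_cases hle : m ≤ x
      · have h1 : ¬ x < m := by omega
        simp only [h1, if_false, hle, if_true, Prod.mk.injEq]
        exact ⟨by omega, trivial⟩
      · have h1 : x < m := by omega
        simp only [h1, if_true, hle, if_false, Prod.mk.injEq]
        exact ⟨by omega, trivial⟩

-- appending at the tail while reading suf[-1] builds the reverse of prepending while reading suf[0]
lemma revApp (l : List Int) : ∀ (st : List (Option Int)), st ≠ [] →
    l.foldl
      (fun (suf : List (Option Int)) p =>
        suf ++ [match PySem.List.pyGetD suf (-1) none with
                | some mn => if mn ≤ p then some mn else some p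
                | none => some p])
      st
    = (l.foldl
        (fun (suf : List (Option Int)) p =>
          (match suf.headD none with
           | some mn => if mn ≤ p then some mn else some p
           | none => some p) :: suf)
        st.reverse).reverse := by
  induction l with
  | nil => intro st _; simp
  | cons x l ih =>
    intro st hst
    rcases List.eq_nil_or_concat st with rfl | ⟨ys, a, rfl⟩
    · exact absurd rfl hst
    · simp only [List.concat_eq_append]
      rw [List.foldl_cons, List.foldl_cons]
      rw [PySem.List.pyGetD_neg_one_append_singleton]
      rw [show (ys ++ [a]).reverse = a :: ys.reverse by simp]
      rw [List.headD_cons]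
      rw [ih _ (by simp)]
      congr 1
      congr 1
      simp

-- B's value fold builds the reversed suffix-minimum table
lemma Bval (l : List Int) :
    l.reverse.foldl
      (fun (suf : List (Option Int)) p =>
        suf ++ [match PySem.List.pyGetD suf (-1) none with
                | some mn => if mn ≤ p then some mn else some p
                | none => some p])
      [none]
    = (sufList l).reverse := by
  rw [revApp _ _ (by simp)]
  congr 1
  have : ([(none : Option Int)]).reverse = [none] := by simp
  rw [this]
  induction l with
  | nil => simp [sufList]
  | cons x xs ih =>
    rw [List.reverse_cons, List.foldl_append, ih, List.foldl_cons, List.foldl_nil]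
    rfl

-- B's counting pass over zip(prefix, table-tail) computes the reference count
lemma Bcnt (l : List Int) : ∀ (c : Int),
    (l.zip ((sufList l).tail)).foldl
      (fun c ps =>
        match ps.2 with
        | some s => if s ≤ ps.1 then c + 1 else c
        | none => c)
      c
    = c + cnt l := by
  induction l with
  | nil => intro c; simp [cnt]
  | cons x xs ih =>
    intro c
    obtain ⟨s0, t0, hs⟩ : ∃ s t, sufList xs = s :: t := by
      cases xs <;> exact ⟨_, _, rfl⟩
    simp only [cnt, sufList, hs, List.headD_cons, List.tail_cons, List.zip_cons_cons,
      List.foldl_cons]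
    have ih' := ih
    simp only [hs, List.tail_cons] at ih'
    rw [ih']
    cases s0 with
    | none => simp
    | some s =>
      by_cases hsx : s ≤ x
      · simp only [hsx, if_true]
        ring
      · simp only [hsx, if_false]
        ring

-- ===== VERDICT (by name: the statement is the Claim_ definition above) =====
theorem lilkaw_spec : Claim_equal_lilkaw := by
  intro n precos _ hpre
  unfold Spec_lilkaw lilkaw lilkaw_alt
  by_cases hn : n ≤ 0
  · rw [PySem.List.pyRange_neg_one_eq_nil (by omega)]
    simp [hn]
  · have h0 : 0 ≤ n := by omega
    obtain ⟨m, rfl⟩ : ∃ m : Nat, n = (m : Int) := ⟨n.toNat, (Int.toNat_of_nonneg h0).symm⟩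
    have hm : m ≤ precos.length := by
      unfold Pre_lilkaw at hpre; omega
    rw [if_neg hn]
    simp only [PySem.List.slice_to_natCast, PySem.List.slice_from_one]
    rw [idxfoldA precos m hm, Aval, idxfoldB precos m hm, Bval, List.reverse_reverse]
    rw [Bcnt]
    simp
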